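-- pv_equiv track=rewrite | github.com/IsabelaCaldeira/Sorbonne_TME | Semestre1/activite /activite5/poly.py | degre
-- ===== SOURCE A (Python) =====
-- from typing import List
--
-- Polyn  = List[int]
--
-- def degre(P:Polyn)->int:
--     """renvoie le degré d'un polynôme
--     """
--     deg : int = 0
--     i : int
--     for i in range(len(P)):
--         if P[i]!=0:
--             deg = deg + 1
--             if i!= deg:
--                 deg = i
--     return deg
-- ===== SOURCE B (Python) =====
-- def degre(P):
--     """renvoie le degré d'un polynôme"""
--     for i in range(len(P) - 1, -1, -1):
--         if P[i] != 0:
--             return i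
--     return 0
-- ===== Notes on version B (the rewrite author's own statement) =====
-- stated objective: simpler
-- what changed: A walks the whole list forward maintaining a last-nonzero accumulator via an obfuscated deg+1 dance; B scans backwards from the end and returns immediately at the first nonzero coefficient, with no accumulator.
import Mathlib
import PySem

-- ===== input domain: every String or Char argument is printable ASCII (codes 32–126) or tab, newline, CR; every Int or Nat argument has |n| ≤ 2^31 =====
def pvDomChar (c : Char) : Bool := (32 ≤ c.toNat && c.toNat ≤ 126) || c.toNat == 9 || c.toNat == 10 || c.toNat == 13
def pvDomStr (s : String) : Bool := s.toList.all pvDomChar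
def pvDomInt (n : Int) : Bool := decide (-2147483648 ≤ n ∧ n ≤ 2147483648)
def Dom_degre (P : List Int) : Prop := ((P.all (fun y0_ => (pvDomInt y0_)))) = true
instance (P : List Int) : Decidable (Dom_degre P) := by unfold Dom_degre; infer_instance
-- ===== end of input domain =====

-- B replaces A's forward pass with its last-nonzero accumulator by a backward scan that
-- returns at the first nonzero coefficient (same result; objective: simpler).

-- ===== PORT A =====
def degre (P : List Int) : Int :=
  (PySem.List.pyRange 0 (P.length : Int) 1).foldl
    (fun deg i =>
      if PySem.List.pyGetD P i 0 ≠ 0 then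
        let deg' := deg + 1
        if i ≠ deg' then i else deg'
      else deg) 0

-- ===== PORT B =====
def degre_alt (P : List Int) : Int :=
  match (PySem.List.pyRange ((P.length : Int) - 1) (-1) (-1)).findSome?
      (fun i => if PySem.List.pyGetD P i 0 ≠ 0 then some i else none) with
  | some i => i
  | none => 0

-- ===== PRECONDITION & SPEC =====
def Spec_degre (P : List Int) (out : Int) : Prop := out = degre_alt P
instance (P : List Int) (out : Int) : Decidable (Spec_degre P out) := by unfold Spec_degre; infer_instance

-- ===== CLAIM (what is proved, stated in full; the proofs are below) =====
def Claim_equal_degre : Prop := ∀ (P : List Int), Dom_degre P → Spec_degre P (degre P)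

-- ===== LEMMAS AND PROOFS =====

theorem findSome?_agree {α β : Type} (l : List α) (f g : α → Option β)
    (h : ∀ a ∈ l, f a = g a) : l.findSome? f = l.findSome? g := by
  induction l with
  | nil => rfl
  | cons x xs ih =>
    simp only [List.findSome?]
    rw [h x (by simp)]
    cases g x with
    | some v => rfl
    | none => exact ih (fun a ha => h a (by simp [ha]))

theorem pyGetD_append_lt (xs : List Int) (c : Int) (i : Int)
    (h0 : 0 ≤ i) (h : i < (xs.length : Int)) :
    PySem.List.pyGetD (xs ++ [c]) i 0 = PySem.List.pyGetD xs i 0 := by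
  rw [PySem.List.pyGetD_eq_getElem (xs ++ [c]) 0 h0 (by simp; omega),
      PySem.List.pyGetD_eq_getElem xs 0 h0 (by omega)]
  rw [List.getElem_append_left (by omega)]

theorem pyGetD_append_len (xs : List Int) (c : Int) :
    PySem.List.pyGetD (xs ++ [c]) (xs.length : Int) 0 = c := by
  rw [PySem.List.pyGetD_eq_getElem (xs ++ [c]) 0 (Int.natCast_nonneg _) (by simp)]
  simp

theorem degre_concat (P : List Int) (c : Int) :
    degre (P ++ [c]) = if c ≠ 0 then (P.length : Int) else degre P := by
  unfold degre
  have hlen : ((P ++ [c]).length : Int) = (P.length : Int) + 1 := by simp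
  rw [hlen, PySem.List.pyRange_one_succ_right (Int.natCast_nonneg _), List.foldl_append]
  have hcongr :
      (PySem.List.pyRange 0 (P.length : Int) 1).foldl
        (fun deg i => if PySem.List.pyGetD (P ++ [c]) i 0 ≠ 0 then
            let deg' := deg + 1; if i ≠ deg' then i else deg' else deg) 0
      = (PySem.List.pyRange 0 (P.length : Int) 1).foldl
        (fun deg i => if PySem.List.pyGetD P i 0 ≠ 0 then
            let deg' := deg + 1; if i ≠ deg' then i else deg' else deg) 0 := by
    apply PySem.List.foldl_congr_mem
    intro acc x hx
    rw [PySem.List.mem_pyRange_one] at hx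
    rw [pyGetD_append_lt P c x hx.1 hx.2]
  rw [hcongr]
  have hlast := pyGetD_append_len P c
  simp only [List.foldl_cons, List.foldl_nil, hlast]
  by_cases hc : c = 0
  · simp [hc]
  · simp only [hc, ne_eq, not_false_eq_true, if_pos]
    split <;> omega

theorem degre_alt_concat (P : List Int) (c : Int) :
    degre_alt (P ++ [c]) = if c ≠ 0 then (P.length : Int) else degre_alt P := by
  unfold degre_alt
  have hlen : ((P ++ [c]).length : Int) - 1 = (P.length : Int) := by simp
  rw [hlen, PySem.List.pyRange_neg_one_cons (by omega)]
  simp only [List.findSome?]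
  rw [pyGetD_append_len P c]
  by_cases hc : c = 0
  · subst hc
    simp only [ne_eq, not_true_eq_false, if_false]
    rw [findSome?_agree _ _
      (fun i => if PySem.List.pyGetD P i 0 ≠ 0 then some i else none)
      (by
        intro a ha
        rw [PySem.List.mem_pyRange_neg_one] at ha
        rw [pyGetD_append_lt P 0 a (by omega) (by omega)])]
  · simp [hc]

theorem degre_eq_alt (P : List Int) : degre P = degre_alt P := by
  induction P using List.reverseRecOn with
  | nil => decide
  | append_singleton Q c ih =>
    rw [degre_concat, degre_alt_concat, ih]

-- ===== VERDICT (by name: the statement is the Claim_ definition above) =====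
theorem degre_spec : Claim_equal_degre := by
  intro P _
  unfold Spec_degre
  exact degre_eq_alt P
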